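-- pv_equiv track=rewrite | github.com/pypi-data/pypi-mirror-400 | packages/cursus/cursus-1.4.7.tar.gz/cursus-1.4.7/src/cursus/steps/scripts/model_wiki_generator.py | _convert_wiki_tables_to_html
-- ===== SOURCE A (Python) =====
-- def _convert_wiki_tables_to_html(content: str) -> str:
--     """Convert wiki table format to HTML tables."""
--     lines = content.split("\n")
--     html_lines = []
--     in_table = False
--
--     for line in lines:
--         if line.startswith("|") and "|" in line[1:]:
--             if not in_table:
--                 html_lines.append("<table>")
--                 in_table = True
--
--             # Parse table row
--             cells = [cell.strip() for cell in line.split("|")[1:-1]]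
--             row_html = (
--                 "<tr>" + "".join(f"<td>{cell}</td>" for cell in cells) + "</tr>"
--             )
--             html_lines.append(row_html)
--         else:
--             if in_table:
--                 html_lines.append("</table>")
--                 in_table = False
--             html_lines.append(line)
--
--     if in_table:
--         html_lines.append("</table>")
--
--     return "\n".join(html_lines)
-- ===== SOURCE B (Python) =====
-- def _convert_wiki_tables_to_html(content: str) -> str:
--     """Convert wiki table format to HTML tables (run-based rewrite)."""
--     lines = content.split("\n")
--
--     def is_row(line):
--         return line.startswith("|") and "|" in line[1:]
--
--     def row_html(line):
--         cells = [cell.strip() for cell in line.split("|")[1:-1]]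
--         return "<tr>" + "".join(f"<td>{cell}</td>" for cell in cells) + "</tr>"
--
--     out = []
--     i = 0
--     n = len(lines)
--     while i < n:
--         if is_row(lines[i]):
--             j = i
--             while j < n and is_row(lines[j]):
--                 j += 1
--             out.append("<table>")
--             for k in range(i, j):
--                 out.append(row_html(lines[k]))
--             out.append("</table>")
--             i = j
--         else:
--             out.append(lines[i])
--             i += 1
--     return "\n".join(out)
-- ===== Notes on version B (the rewrite author's own statement) =====
-- stated objective: alternative
-- what changed: Replaces the stateful in_table-flag scan with a run-based pass that finds each maximal block of table rows up front and emits <table>, its rows, </table> as one unit, so no flag is carried or flushed at the end.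
import Mathlib
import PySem

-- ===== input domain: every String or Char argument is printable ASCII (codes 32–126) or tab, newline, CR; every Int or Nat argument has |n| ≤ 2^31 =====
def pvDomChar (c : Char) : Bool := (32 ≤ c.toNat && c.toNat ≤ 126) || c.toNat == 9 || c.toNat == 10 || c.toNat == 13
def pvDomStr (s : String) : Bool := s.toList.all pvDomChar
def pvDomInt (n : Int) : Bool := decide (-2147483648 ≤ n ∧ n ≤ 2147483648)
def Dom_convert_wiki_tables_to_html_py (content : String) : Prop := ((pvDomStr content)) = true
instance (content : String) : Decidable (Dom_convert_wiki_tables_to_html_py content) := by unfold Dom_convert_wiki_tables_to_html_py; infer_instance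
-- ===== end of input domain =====

-- B replaces A's stateful in_table-flag scan by a run-based pass (maximal blocks of
-- table rows found up front, each emitted as one <table>…</table> unit); alternative
-- decomposition, same cost.

-- ===== PORT A =====
-- exact port of str.split(sep) for a nonempty separator (PySem.Chars.splitOn is that form); used by both ports
def pvSplit (s sep : String) : List String :=
  (PySem.Chars.splitOn s.toList sep.toList).map String.ofList

-- line.startswith("|") and "|" in line[1:]
def pvIsRowA (line : String) : Bool :=
  PySem.Str.startswith line "|" && PySem.Str.isIn "|" (PySem.Str.slice line (some 1) none)

-- "<tr>" + "".join(f"<td>{cell}</td>" for cell in cells) + "</tr>", cells from line.split("|")[1:-1]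
def pvRowHtmlA (line : String) : String :=
  let cells := (PySem.List.slice (pvSplit line "|") (some 1) (some (-1))).map PySem.Str.strip
  "<tr>" ++ PySem.Str.join "" (cells.map (fun cell => "<td>" ++ cell ++ "</td>")) ++ "</tr>"

-- the body of A's for-loop, state = (html_lines, in_table)
def pvStepA (st : List String × Bool) (line : String) : List String × Bool :=
  if pvIsRowA line then
    let hl := if !st.2 then st.1 ++ ["<table>"] else st.1
    (hl ++ [pvRowHtmlA line], true)
  else
    let hl := if st.2 then st.1 ++ ["</table>"] else st.1
    (hl ++ [line], false)

-- the trailing 'if in_table: html_lines.append("</table>")'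
def pvFinishA (st : List String × Bool) : List String :=
  if st.2 then st.1 ++ ["</table>"] else st.1

def convert_wiki_tables_to_html_py (content : String) : String :=
  let lines := pvSplit content "\n"
  PySem.Str.join "\n" (pvFinishA (lines.foldl pvStepA ([], false)))

-- ===== PORT B =====
def pvIsRowB (line : String) : Bool :=
  PySem.Str.startswith line "|" && PySem.Str.isIn "|" (PySem.Str.slice line (some 1) none)

def pvRowHtmlB (line : String) : String :=
  let cells := (PySem.List.slice (pvSplit line "|") (some 1) (some (-1))).map PySem.Str.strip
  "<tr>" ++ PySem.Str.join "" (cells.map (fun cell => "<td>" ++ cell ++ "</td>")) ++ "</tr>"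

-- B's outer while-loop; the inner run scan (j, then the for k in range(i, j)) is ported
-- as takeWhile/dropWhile on the remaining lines.
def pvEmitB : List String → List String
  | [] => []
  | l :: ls =>
    if pvIsRowB l then
      "<table>" :: (pvRowHtmlB l :: (ls.takeWhile pvIsRowB).map pvRowHtmlB)
        ++ "</table>" :: pvEmitB (ls.dropWhile pvIsRowB)
    else
      l :: pvEmitB ls
termination_by ls => ls.length
decreasing_by
  · exact Nat.lt_succ_of_le (ls.length_dropWhile_le pvIsRowB)
  · exact Nat.lt_succ_self _

def convert_wiki_tables_to_html_py_alt (content : String) : String :=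
  PySem.Str.join "\n" (pvEmitB (pvSplit content "\n"))

-- ===== PRECONDITION & SPEC =====
def Spec_convert_wiki_tables_to_html_py (content : String) (out : String) : Prop := out = convert_wiki_tables_to_html_py_alt content
instance (content : String) (out : String) : Decidable (Spec_convert_wiki_tables_to_html_py content out) := by unfold Spec_convert_wiki_tables_to_html_py; infer_instance

-- ===== CLAIM (what is proved, stated in full; the proofs are below) =====
def Claim_equal_convert_wiki_tables_to_html_py : Prop := ∀ (content : String), Dom_convert_wiki_tables_to_html_py content → Spec_convert_wiki_tables_to_html_py content (convert_wiki_tables_to_html_py content)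

-- ===== LEMMAS AND PROOFS =====
lemma pvIsRowB_eq : pvIsRowB = pvIsRowA := rfl
lemma pvRowHtmlB_eq : pvRowHtmlB = pvRowHtmlA := rfl

lemma pvEmitB_nil : pvEmitB [] = [] := by rw [pvEmitB]

lemma pvEmitB_cons_pos {l : String} {ls : List String} (hp : pvIsRowA l = true) :
    pvEmitB (l :: ls) =
      "<table>" :: (pvRowHtmlA l :: (ls.takeWhile pvIsRowA).map pvRowHtmlA)
        ++ "</table>" :: pvEmitB (ls.dropWhile pvIsRowA) := by
  rw [pvEmitB]; simp [pvIsRowB_eq, pvRowHtmlB_eq, hp]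

lemma pvEmitB_cons_neg {l : String} {ls : List String} (hp : pvIsRowA l = false) :
    pvEmitB (l :: ls) = l :: pvEmitB ls := by
  rw [pvEmitB]; simp [pvIsRowB_eq, hp]

lemma pvStepA_pos_false {acc : List String} {l : String} (hp : pvIsRowA l = true) :
    pvStepA (acc, false) l = (acc ++ ["<table>", pvRowHtmlA l], true) := by
  simp [pvStepA, hp]

lemma pvStepA_pos_true {acc : List String} {l : String} (hp : pvIsRowA l = true) :
    pvStepA (acc, true) l = (acc ++ [pvRowHtmlA l], true) := by
  simp [pvStepA, hp]

lemma pvStepA_neg_false {acc : List String} {l : String} (hp : pvIsRowA l = false) :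
    pvStepA (acc, false) l = (acc ++ [l], false) := by
  simp [pvStepA, hp]

lemma pvStepA_neg_true {acc : List String} {l : String} (hp : pvIsRowA l = false) :
    pvStepA (acc, true) l = (acc ++ ["</table>", l], false) := by
  simp [pvStepA, hp]

-- the flag-scan, run to completion, equals the run-based emission (both flag values)
lemma pvMain : ∀ (n : Nat) (lines : List String), lines.length ≤ n →
    (∀ acc, pvFinishA (lines.foldl pvStepA (acc, false)) = acc ++ pvEmitB lines)
  ∧ (∀ acc, pvFinishA (lines.foldl pvStepA (acc, true)) =
      acc ++ (lines.takeWhile pvIsRowA).map pvRowHtmlA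
        ++ "</table>" :: pvEmitB (lines.dropWhile pvIsRowA)) := by
  intro n
  induction n with
  | zero =>
    intro lines hlen
    have : lines = [] := List.length_eq_zero_iff.mp (Nat.le_zero.mp hlen)
    subst this
    exact ⟨fun acc => by simp [pvFinishA, pvEmitB_nil],
           fun acc => by simp [pvFinishA, pvEmitB_nil]⟩
  | succ n ih =>
    intro lines hlen
    match lines with
    | [] =>
      exact ⟨fun acc => by simp [pvFinishA, pvEmitB_nil],
             fun acc => by simp [pvFinishA, pvEmitB_nil]⟩
    | l :: ls =>
      have hls : ls.length ≤ n := by simpa using Nat.lt_succ_iff.mp (Nat.lt_of_lt_of_le (by simp) hlen)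
      constructor
      · intro acc
        by_cases hp : pvIsRowA l = true
        · rw [List.foldl_cons, pvStepA_pos_false hp,
              (ih ls hls).2 (acc ++ ["<table>", pvRowHtmlA l]), pvEmitB_cons_pos hp]
          simp
        · have hp' : pvIsRowA l = false := by simpa using hp
          rw [List.foldl_cons, pvStepA_neg_false hp',
              (ih ls hls).1 (acc ++ [l]), pvEmitB_cons_neg hp']
          simp
      · intro acc
        by_cases hp : pvIsRowA l = true
        · rw [List.foldl_cons, pvStepA_pos_true hp,
              (ih ls hls).2 (acc ++ [pvRowHtmlA l]),
              List.takeWhile_cons_of_pos hp, List.dropWhile_cons_of_pos hp]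
          simp
        · have hp' : pvIsRowA l = false := by simpa using hp
          rw [List.foldl_cons, pvStepA_neg_true hp',
              (ih ls hls).1 (acc ++ ["</table>", l]),
              List.takeWhile_cons_of_neg (by simp [hp']), List.dropWhile_cons_of_neg (by simp [hp']),
              pvEmitB_cons_neg hp']
          simp

-- ===== VERDICT (by name: the statement is the Claim_ definition above) =====
theorem convert_wiki_tables_to_html_py_spec : Claim_equal_convert_wiki_tables_to_html_py := by
  intro content _
  show PySem.Str.join "\n" (pvFinishA (List.foldl pvStepA ([], false) (pvSplit content "\n"))) =
    PySem.Str.join "\n" (pvEmitB (pvSplit content "\n"))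
  rw [(pvMain (pvSplit content "\n").length _ le_rfl).1 []]
  simp
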